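-- pv_equiv track=rewrite | github.com/QSOLKCB/QEC | src/qec/analysis/parity_coherence.py | _segment_sign_runs
-- ===== SOURCE A (Python) =====
-- from typing import Any, Dict, List, Optional
--
-- def _segment_sign_runs(signs: List[int]) -> List[tuple[int, int, int, int]]:
--     """Return contiguous non-zero sign runs; zero values terminate runs."""
--     runs: List[tuple[int, int, int, int]] = []
--     current_sign = 0
--     current_len = 0
--     current_start = -1
--
--     for idx, sign in enumerate(signs):
--         if sign == 0:
--             if current_sign != 0 and current_len > 0:
--                 runs.append((current_sign, current_len, current_start, idx - 1))
--             current_sign = 0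
--             current_len = 0
--             current_start = -1
--             continue
--
--         if sign == current_sign:
--             current_len += 1
--         else:
--             if current_sign != 0 and current_len > 0:
--                 runs.append((current_sign, current_len, current_start, idx - 1))
--             current_sign = sign
--             current_len = 1
--             current_start = idx
--
--     if current_sign != 0 and current_len > 0:
--         runs.append((current_sign, current_len, current_start, len(signs) - 1))
--     return runs
-- ===== SOURCE B (Python) =====
-- from typing import Any, Dict, List, Optional
--
-- def _segment_sign_runs(signs: List[int]) -> List[tuple[int, int, int, int]]:
--     """Return contiguous non-zero sign runs; zero values terminate runs."""
--     runs: List[tuple[int, int, int, int]] = []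
--     i = 0
--     n = len(signs)
--     while i < n:
--         j = i + 1
--         while j < n and signs[j] == signs[i]:
--             j += 1
--         if signs[i] != 0:
--             runs.append((signs[i], j - i, i, j - 1))
--         i = j
--     return runs
-- ===== Notes on version B (the rewrite author's own statement) =====
-- stated objective: simpler
-- what changed: Replaced the element-wise state machine (current sign/length/start carried across iterations with three close-and-reset sites) by a group-first scan: find each maximal equal-value group, emit it in one place if non-zero, and jump past it.
import Mathlib
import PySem

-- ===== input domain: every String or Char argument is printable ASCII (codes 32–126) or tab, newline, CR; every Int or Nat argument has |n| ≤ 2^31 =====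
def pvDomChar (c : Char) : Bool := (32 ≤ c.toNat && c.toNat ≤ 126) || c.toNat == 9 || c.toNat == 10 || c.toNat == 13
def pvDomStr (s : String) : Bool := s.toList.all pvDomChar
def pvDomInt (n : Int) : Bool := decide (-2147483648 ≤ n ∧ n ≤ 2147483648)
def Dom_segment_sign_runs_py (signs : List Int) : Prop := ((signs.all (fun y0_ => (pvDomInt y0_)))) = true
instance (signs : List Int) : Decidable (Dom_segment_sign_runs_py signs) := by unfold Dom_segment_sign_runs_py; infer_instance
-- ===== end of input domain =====

-- B replaces A's element-wise state machine by a group-first scan over maximal equal runs (simpler decomposition; same O(n) cost).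


-- ===== PORT A =====
-- A's for-loop over enumerate(signs), carrying (current_sign, current_len, current_start)
-- and the running index idx; the trailing close uses idx - 1 = len(signs) - 1 at loop exit.
def segRunsGo (signs : List Int) (idx cs cl cst : Int)
    (runs : List (Int × Int × Int × Int)) : List (Int × Int × Int × Int) :=
  match signs with
  | [] => if cs ≠ 0 ∧ 0 < cl then runs ++ [(cs, cl, cst, idx - 1)] else runs
  | s :: rest =>
    if s = 0 then
      segRunsGo rest (idx + 1) 0 0 (-1)
        (if cs ≠ 0 ∧ 0 < cl then runs ++ [(cs, cl, cst, idx - 1)] else runs)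
    else if s = cs then
      segRunsGo rest (idx + 1) cs (cl + 1) cst runs
    else
      segRunsGo rest (idx + 1) s 1 idx
        (if cs ≠ 0 ∧ 0 < cl then runs ++ [(cs, cl, cst, idx - 1)] else runs)

def segment_sign_runs_py (signs : List Int) : List (Int × Int × Int × Int) :=
  segRunsGo signs 0 0 0 (-1) []

-- ===== PORT B =====
-- B's outer while-loop: at position pos the group of the head element extends over
-- takeWhile (= head); emit it if the value is non-zero and jump past the group.
def segRunsGrp (signs : List Int) (pos : Int) : List (Int × Int × Int × Int) :=
  match signs with
  | [] => []
  | x :: rest =>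
    let n : Int := 1 + ((rest.takeWhile (fun y => y == x)).length : Int)
    let tail := rest.dropWhile (fun y => y == x)
    if x = 0 then segRunsGrp tail (pos + n)
    else (x, n, pos, pos + n - 1) :: segRunsGrp tail (pos + n)
termination_by signs.length
decreasing_by all_goals
  · simp only [List.length_cons]
    exact Nat.lt_succ_of_le (rest.length_dropWhile_le _)

def segment_sign_runs_py_alt (signs : List Int) : List (Int × Int × Int × Int) :=
  segRunsGrp signs 0

-- ===== PRECONDITION & SPEC =====
def Spec_segment_sign_runs_py (signs : List Int) (out : List (Int × Int × Int × Int)) : Prop := out = segment_sign_runs_py_alt signs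
instance (signs : List Int) (out : List (Int × Int × Int × Int)) : Decidable (Spec_segment_sign_runs_py signs out) := by unfold Spec_segment_sign_runs_py; infer_instance

-- ===== CLAIM (what is proved, stated in full; the proofs are below) =====
def Claim_equal_segment_sign_runs_py : Prop := ∀ (signs : List Int), Dom_segment_sign_runs_py signs → Spec_segment_sign_runs_py signs (segment_sign_runs_py signs)

-- ===== LEMMAS AND PROOFS =====

-- skipping a single zero is absorbed into B's zero group
lemma segRunsGrp_zero_cons (t : List Int) (pos : Int) :
    segRunsGrp (0 :: t) pos = segRunsGrp t (pos + 1) := by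
  cases t with
  | nil => simp [segRunsGrp]
  | cons y t' =>
    by_cases hy : y = 0
    · subst hy
      rw [segRunsGrp, segRunsGrp]
      simp only [List.takeWhile, List.dropWhile, beq_self_eq_true]
      simp only [List.length_cons]
      push_cast
      ring_nf
    · have hb : (y == (0 : Int)) = false := by simp [hy]
      rw [segRunsGrp]
      simp only [List.takeWhile, List.dropWhile, hb]
      simp

-- combined invariant: fresh state reproduces B; an open run (cs, cl, cst) gets closed
-- after the pending takeWhile-extension and the rest reproduces B.
lemma segRuns_main (signs : List Int) :
    (∀ pos runs, segRunsGo signs pos 0 0 (-1) runs = runs ++ segRunsGrp signs pos) ∧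
    (∀ pos cs cl cst runs, cs ≠ 0 → 0 < cl →
      segRunsGo signs pos cs cl cst runs =
        runs ++ (cs, cl + ((signs.takeWhile (fun y => y == cs)).length : Int), cst,
                  pos + ((signs.takeWhile (fun y => y == cs)).length : Int) - 1)
          :: segRunsGrp (signs.dropWhile (fun y => y == cs))
              (pos + ((signs.takeWhile (fun y => y == cs)).length : Int))) := by
  induction signs with
  | nil =>
    constructor
    · intro pos runs; simp [segRunsGo, segRunsGrp]
    · intro pos cs cl cst runs hcs hcl
      simp [segRunsGo, segRunsGrp, hcs, hcl]
  | cons x rest ih =>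
    obtain ⟨ih1, ih2⟩ := ih
    have hclose0 : ∀ (runs : List (Int × Int × Int × Int)) (p : Int),
        (if (0 : Int) ≠ 0 ∧ (0 : Int) < 0 then runs ++ [((0:Int), (0:Int), (-1:Int), p)] else runs) = runs := by
      intro runs p; simp
    constructor
    · intro pos runs
      by_cases hx : x = 0
      · subst hx
        rw [segRunsGo, if_pos rfl, hclose0, ih1, segRunsGrp_zero_cons]
      · rw [segRunsGo, if_neg hx, if_neg hx, hclose0,
           ih2 (pos + 1) x 1 pos runs hx (by norm_num)]
        rw [segRunsGrp]
        simp only [if_neg hx]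
        rw [show pos + 1 + ((rest.takeWhile (fun y => y == x)).length : Int)
              = pos + (1 + ((rest.takeWhile (fun y => y == x)).length : Int)) from by ring]
    · intro pos cs cl cst runs hcs hcl
      have hb0 : ((0 : Int) == cs) = false := by simp [Ne.symm hcs]
      by_cases hx : x = 0
      · subst hx
        have htw : (((0 : Int) :: rest).takeWhile (fun y => y == cs)) = [] := by
          simp [List.takeWhile, hb0]
        have hdw : (((0 : Int) :: rest).dropWhile (fun y => y == cs)) = 0 :: rest := by
          simp [List.dropWhile, hb0]
        rw [htw, hdw, segRunsGrp_zero_cons, segRunsGo, if_pos rfl,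
           if_pos ⟨hcs, hcl⟩, ih1]
        norm_num
      · by_cases hxc : x = cs
        · subst hxc
          have hbx : ((x : Int) == x) = true := by simp
          rw [segRunsGo, if_neg hx, if_pos rfl,
             ih2 (pos + 1) x (cl + 1) cst runs hx (by omega)]
          simp only [List.takeWhile, List.dropWhile, hbx]
          simp only [List.length_cons]
          push_cast
          ring_nf
        · have hbx : ((x : Int) == cs) = false := by simp [hxc]
          have htw : ((x :: rest).takeWhile (fun y => y == cs)) = [] := by
            simp [List.takeWhile, hbx]
          have hdw : ((x :: rest).dropWhile (fun y => y == cs)) = x :: rest := by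
            simp [List.dropWhile, hbx]
          rw [htw, hdw, segRunsGo, if_neg hx, if_neg hxc, if_pos ⟨hcs, hcl⟩,
             ih2 (pos + 1) x 1 pos _ hx (by norm_num)]
          rw [segRunsGrp]
          simp only [if_neg hx]
          rw [show pos + 1 + ((rest.takeWhile (fun y => y == x)).length : Int)
                = pos + (1 + ((rest.takeWhile (fun y => y == x)).length : Int)) from by ring]
          simp

-- ===== VERDICT (by name: the statement is the Claim_ definition above) =====
theorem segment_sign_runs_py_spec : Claim_equal_segment_sign_runs_py := by
  intro signs _
  unfold Spec_segment_sign_runs_py segment_sign_runs_py segment_sign_runs_py_alt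
  simpa using (segRuns_main signs).1 0 []
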